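-- pv_equiv track=rewrite | github.com/same19/AT-CS-2023-24 | Labs/Unit02/GamesLab02/gameslab02.py | binary_strings
-- ===== SOURCE A (Python) =====
-- def binary_strings(k, allowed_start_one = True):
--     if k == 1:
--         if allowed_start_one:
--             return ['0', '1']
--         else:
--             return ['0']
--     if allowed_start_one:
--         return ['0' + i for i in binary_strings(k-1, True)]+['1' + i for i in binary_strings(k-1, False)]
--     else:
--         return ['0' + i for i in binary_strings(k-1, True)]
-- ===== SOURCE B (Python) =====
-- def binary_strings(k, allowed_start_one = True):
--     if k < 1:
--         raise ValueError("k must be at least 1")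
--     # bottom-up DP: t = strings of current length with no "11", f = those starting with '0'
--     t, f = ['0', '1'], ['0']
--     for _ in range(k - 1):
--         zeros = ['0' + s for s in t]
--         t, f = zeros + ['1' + s for s in f], zeros
--     return t if allowed_start_one else f
-- ===== Notes on version B (the rewrite author's own statement) =====
-- stated objective: alternative
-- what changed: replaces the exponentially branching unmemoized recursion by a bottom-up iterative DP that keeps the two subproblem lists (all strings / strings starting with '0') of the current length and extends them once per length; same output, avoids recomputing shared subproblems
import Mathlib
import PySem

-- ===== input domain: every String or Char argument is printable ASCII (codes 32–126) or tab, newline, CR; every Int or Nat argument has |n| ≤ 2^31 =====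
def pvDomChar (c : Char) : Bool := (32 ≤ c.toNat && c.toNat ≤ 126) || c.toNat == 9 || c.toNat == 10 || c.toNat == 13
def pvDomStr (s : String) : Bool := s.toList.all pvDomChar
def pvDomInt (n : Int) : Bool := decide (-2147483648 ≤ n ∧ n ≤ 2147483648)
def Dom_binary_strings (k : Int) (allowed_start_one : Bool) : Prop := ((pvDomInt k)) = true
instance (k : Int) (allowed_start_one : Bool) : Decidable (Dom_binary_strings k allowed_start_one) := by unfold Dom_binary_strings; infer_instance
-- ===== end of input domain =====

-- B replaces A's unmemoized double recursion by a bottom-up iterative DP over lengths (alternative decomposition; avoids recomputing shared subproblems).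


-- ===== PORT A =====
-- fuel = k.toNat suffices for every k ≥ 1 (inside Pre_); for k ≤ 0 Python A diverges (RecursionError).
def binaryStringsFuel (fuel : Nat) (k : Int) (allowed_start_one : Bool) : List String :=
  match fuel with
  | 0 => []
  | fuel + 1 =>
    if k == 1 then
      if allowed_start_one then ["0", "1"] else ["0"]
    else
      if allowed_start_one then
        (binaryStringsFuel fuel (k - 1) true).map (fun i => "0" ++ i)
          ++ (binaryStringsFuel fuel (k - 1) false).map (fun i => "1" ++ i)
      else
        (binaryStringsFuel fuel (k - 1) true).map (fun i => "0" ++ i)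

def binary_strings (k : Int) (allowed_start_one : Bool) : List String :=
  binaryStringsFuel k.toNat k allowed_start_one

-- ===== PORT B =====
def bsStep (p : List String × List String) : List String × List String :=
  let zeros := p.1.map (fun s => "0" ++ s)
  (zeros ++ p.2.map (fun s => "1" ++ s), zeros)

-- for k < 1 the Python B raises ValueError (outside Pre_); the port returns the base lists there
def binary_strings_alt (k : Int) (allowed_start_one : Bool) : List String :=
  let p := (List.range (k - 1).toNat).foldl (fun p _ => bsStep p) (["0", "1"], ["0"])
  if allowed_start_one then p.1 else p.2

-- ===== PRECONDITION & SPEC =====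
-- Pre_ excludes exactly k ≤ 0: A never reaches its base case there (RecursionError) and B raises ValueError.
def Pre_binary_strings (k : Int) (allowed_start_one : Bool) : Prop := 1 ≤ k
instance (k : Int) (allowed_start_one : Bool) : Decidable (Pre_binary_strings k allowed_start_one) := by unfold Pre_binary_strings; infer_instance
def pvWitness_binary_strings : Int × Bool := (3, true)

def Spec_binary_strings (k : Int) (allowed_start_one : Bool) (out : List String) : Prop := out = binary_strings_alt k allowed_start_one
instance (k : Int) (allowed_start_one : Bool) (out : List String) : Decidable (Spec_binary_strings k allowed_start_one out) := by unfold Spec_binary_strings; infer_instance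

-- ===== CLAIM =====
def Claim_equal_binary_strings : Prop := ∀ (k : Int) (allowed_start_one : Bool), Dom_binary_strings k allowed_start_one → Pre_binary_strings k allowed_start_one → Spec_binary_strings k allowed_start_one (binary_strings k allowed_start_one)
-- ===== LEMMAS AND PROOFS =====
def bsLoop (n : Nat) : List String × List String :=
  (List.range n).foldl (fun p _ => bsStep p) (["0", "1"], ["0"])

theorem bsLoop_succ (n : Nat) : bsLoop (n + 1) = bsStep (bsLoop n) := by
  simp [bsLoop, List.range_succ]

theorem fuel_loop (n : Nat) (b : Bool) :
    binaryStringsFuel (n + 1) ((n : Int) + 1) b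
      = (if b then (bsLoop n).1 else (bsLoop n).2) := by
  induction n generalizing b with
  | zero => cases b <;> simp [binaryStringsFuel, bsLoop]
  | succ m ih =>
    push_cast
    rw [binaryStringsFuel]
    have h1 : ((((m : Int) + 1) + 1) == 1) = false := by simp; omega
    have harg : ((m : Int) + 1 + 1) - 1 = (m : Int) + 1 := by ring
    rw [h1, harg]
    simp only [Bool.false_eq_true, if_false]
    rw [ih, ih, bsLoop_succ]
    cases b <;> simp [bsStep]

theorem binary_strings_spec : Claim_equal_binary_strings := by
  intro k b _ hk
  unfold Pre_binary_strings at hk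
  unfold Spec_binary_strings binary_strings binary_strings_alt
  obtain ⟨n, rfl⟩ : ∃ n : Nat, k = (n : Int) + 1 := ⟨(k - 1).toNat, by omega⟩
  have hfuel : ((n : Int) + 1).toNat = n + 1 := by omega
  have harg : ((n : Int) + 1 - 1).toNat = n := by omega
  rw [hfuel, fuel_loop]
  cases b <;> simp [bsLoop, harg]

-- ===== VERDICT =====
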